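-- pv_equiv track=rewrite | github.com/faircloth-lab/edittag | edittag/helpers.py | get_tag_flows
-- ===== SOURCE A (Python) =====
-- def get_tag_flows(tag):
--     """return the number of regent flows to sequence a given tag"""
--     flows = []
--     for base in tag:
--         for count, flow in enumerate(['T', 'A', 'C', 'G']):
--             if base == flow:
--                 flows.append(count + 1)
--                 break
--     return sum(flows)
-- ===== SOURCE B (Python) =====
-- def get_tag_flows(tag):
--     """return the number of regent flows to sequence a given tag"""
--     counts = {}
--     for base in tag:
--         counts[base] = counts.get(base, 0) + 1
--     weights = {'T': 1, 'A': 2, 'C': 3, 'G': 4}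
--     return sum(counts.get(b, 0) * w for b, w in weights.items())
-- ===== Notes on version B (the rewrite author's own statement) =====
-- stated objective: faster
-- what changed: B builds a frequency table of the tag in one pass and then sums count*weight over the fixed 4-base alphabet, instead of scanning an enumerated flow list and appending to a list for every character of the tag.
import Mathlib
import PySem

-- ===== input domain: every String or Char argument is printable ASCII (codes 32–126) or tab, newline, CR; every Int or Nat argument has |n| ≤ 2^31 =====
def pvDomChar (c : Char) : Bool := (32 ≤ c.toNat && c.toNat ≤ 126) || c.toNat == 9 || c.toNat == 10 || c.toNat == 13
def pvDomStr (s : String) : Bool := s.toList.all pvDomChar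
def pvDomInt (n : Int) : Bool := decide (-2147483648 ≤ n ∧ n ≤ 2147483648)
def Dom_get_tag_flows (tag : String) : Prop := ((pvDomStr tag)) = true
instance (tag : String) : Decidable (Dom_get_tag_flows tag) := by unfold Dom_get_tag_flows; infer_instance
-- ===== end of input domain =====

-- B replaces A's per-character scan of an enumerated flow list by a one-pass
-- frequency table summed against the fixed 4-base weight alphabet (alternative decomposition).


-- ===== PORT A =====
-- A's inner 'for count, flow in enumerate(...): if base == flow: ...; break'
def pvFindFlow (base : Char) : List (Int × Char) → Option Int
  | [] => none
  | (count, flow) :: rest => if base == flow then some (count + 1) else pvFindFlow base rest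

def get_tag_flows (tag : String) : Int :=
  let flows : List Int := tag.toList.foldl (fun flows base =>
    match pvFindFlow base (PySem.List.enumerate ['T', 'A', 'C', 'G']) with
    | some v => flows ++ [v]
    | none => flows) []
  flows.sum

-- ===== PORT B =====
def get_tag_flows_alt (tag : String) : Int :=
  let counts : PySem.Dict Char Int :=
    tag.toList.foldl (fun d base => d.modify base 0 (· + 1)) PySem.Dict.empty
  let weights : List (Char × Int) := [('T', 1), ('A', 2), ('C', 3), ('G', 4)]
  weights.foldl (fun acc p => acc + counts.getD p.1 0 * p.2) 0

-- ===== PRECONDITION & SPEC =====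
def Spec_get_tag_flows (tag : String) (out : Int) : Prop := out = get_tag_flows_alt tag
instance (tag : String) (out : Int) : Decidable (Spec_get_tag_flows tag out) := by unfold Spec_get_tag_flows; infer_instance

-- ===== CLAIM (what is proved, stated in full; the proofs are below) =====
def Claim_equal_get_tag_flows : Prop := ∀ (tag : String), Dom_get_tag_flows tag → Spec_get_tag_flows tag (get_tag_flows tag)

-- ===== LEMMAS AND PROOFS =====

-- weight of one character (0 = not a flow base)
def pvW (c : Char) : Int :=
  if c = 'T' then 1 else if c = 'A' then 2 else if c = 'C' then 3 else if c = 'G' then 4 else 0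

theorem pvEnum_eval :
    PySem.List.enumerate ['T', 'A', 'C', 'G'] =
      [((0 : Int), 'T'), (1, 'A'), (2, 'C'), (3, 'G')] := by decide

theorem pvFindFlow_eval (c : Char) :
    pvFindFlow c [((0 : Int), 'T'), (1, 'A'), (2, 'C'), (3, 'G')] =
      if pvW c = 0 then none else some (pvW c) := by
  simp only [pvFindFlow, pvW]
  by_cases h1 : c = 'T' <;> by_cases h2 : c = 'A' <;> by_cases h3 : c = 'C' <;>
    by_cases h4 : c = 'G' <;> simp_all

theorem getA_inv (l : List Char) (acc : List Int) :
    (l.foldl (fun flows base =>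
      match pvFindFlow base [((0 : Int), 'T'), (1, 'A'), (2, 'C'), (3, 'G')] with
      | some v => flows ++ [v]
      | none => flows) acc).sum = acc.sum + (l.map pvW).sum := by
  induction l generalizing acc with
  | nil => simp
  | cons c rest ih =>
      simp only [List.foldl_cons, pvFindFlow_eval c, List.map_cons, List.sum_cons]
      by_cases h : pvW c = 0 <;> simp only [h, if_pos, if_neg, ite_true, ite_false,
        reduceIte] <;> rw [ih] <;> simp <;> ring

theorem sumW_eq_counts (l : List Char) :
    (l.map pvW).sum =
      (l.count 'T' : Int) * 1 + (l.count 'A' : Int) * 2 +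
      (l.count 'C' : Int) * 3 + (l.count 'G' : Int) * 4 := by
  induction l with
  | nil => simp
  | cons c rest ih =>
      simp only [List.map_cons, List.sum_cons, List.count_cons, ih, pvW]
      by_cases h1 : c = 'T' <;> by_cases h2 : c = 'A' <;> by_cases h3 : c = 'C' <;>
        by_cases h4 : c = 'G' <;> simp_all <;> ring

-- ===== VERDICT (by name: the statement is the Claim_ definition above) =====
theorem get_tag_flows_spec : Claim_equal_get_tag_flows := by
  intro tag _
  show get_tag_flows tag = get_tag_flows_alt tag
  unfold get_tag_flows get_tag_flows_alt
  simp only [pvEnum_eval]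
  rw [← PySem.Dict.counter_eq_foldl]
  simp only [List.foldl_cons, List.foldl_nil, PySem.Dict.getD_counter]
  rw [getA_inv, sumW_eq_counts]
  simp only [List.sum_nil]
  ring
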